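-- pv_equiv track=rewrite | github.com/facebookresearch/maca | utils.py | get_agent_device_assignment
-- ===== SOURCE A (Python) =====
-- def get_agent_device_assignment(
--     num_agents: int,
--     max_agents_per_device: int,
--     devices: list
-- ):
--     if len(devices) == 1 and devices[0] == 'cpu':
--         return {0: {i:devices[0] for i in range(num_agents)}}
--
--     max_debates = (len(devices) * max_agents_per_device) // num_agents
--     current_device, current_capacity = 0, max_agents_per_device
--     debta_map = {i:{} for i in range(max_debates)}
--     for i in range(max_debates):
--         for j in range(num_agents):
--             if current_capacity > 0:
--                 debta_map[i].update({j: devices[current_device]})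
--                 current_capacity -= 1
--             else:
--                 current_device += 1
--                 current_capacity = max_agents_per_device - 1
--                 debta_map[i].update({j: devices[current_device]})
--     return debta_map
-- ===== SOURCE B (Python) =====
-- def get_agent_device_assignment(
--     num_agents: int,
--     max_agents_per_device: int,
--     devices: list
-- ):
--     if len(devices) == 1 and devices[0] == 'cpu':
--         return {0: {i: devices[0] for i in range(num_agents)}}
--     max_debates = (len(devices) * max_agents_per_device) // num_agents
--     if max_debates <= 0:
--         return {}
--     used = max_debates * num_agents
--     # stage 1: flat roster of the used slots -- each device repeated up to its capacity
--     flat = []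
--     for d in devices:
--         need = used - len(flat)
--         if need <= 0:
--             break
--         flat.extend([d] * min(max_agents_per_device, need))
--     # stage 2: chunk the roster into debates of num_agents consecutive slots
--     return {i: dict(enumerate(flat[i * num_agents:(i + 1) * num_agents]))
--             for i in range(max_debates)}
-- ===== Notes on version B (the rewrite author's own statement) =====
-- stated objective: alternative
-- what changed: Instead of walking the nested debate/agent loops with a current_device/current_capacity state machine, B builds in one staged pass a flat roster (each device repeated max_agents_per_device times, truncated to the used slots) and then chunks that list into debates of num_agents consecutive slots via slicing and enumerate.
import Mathlib
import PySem

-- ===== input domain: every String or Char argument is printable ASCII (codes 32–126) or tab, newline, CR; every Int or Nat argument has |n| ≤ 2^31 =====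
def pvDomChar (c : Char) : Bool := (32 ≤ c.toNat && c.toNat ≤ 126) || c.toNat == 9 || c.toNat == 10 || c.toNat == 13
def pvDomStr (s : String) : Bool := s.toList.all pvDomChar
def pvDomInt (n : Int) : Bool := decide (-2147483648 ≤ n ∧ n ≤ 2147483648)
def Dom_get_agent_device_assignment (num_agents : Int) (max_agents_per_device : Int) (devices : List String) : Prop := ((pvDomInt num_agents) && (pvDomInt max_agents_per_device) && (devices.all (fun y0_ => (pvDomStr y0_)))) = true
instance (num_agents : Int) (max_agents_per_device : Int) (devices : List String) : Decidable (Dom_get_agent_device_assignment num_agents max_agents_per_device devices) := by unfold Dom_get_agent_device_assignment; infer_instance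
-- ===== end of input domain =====

-- B replaces A's nested loops with a current_device/current_capacity state machine by two staged
-- passes: build one flat roster (each device repeated max_agents_per_device times, truncated to the
-- used slots), then chunk it into debates by slicing (objective: alternative). Return value only.

-- ===== PORT A =====
def get_agent_device_assignment (num_agents : Int) (max_agents_per_device : Int) (devices : List String) : List (Int × List (Int × String)) :=
  if (devices.length : Int) == 1 && ((PySem.List.pyGet? devices 0).getD "") == "cpu" then
    [(0, (PySem.List.pyRange 0 num_agents 1).map (fun i => (i, (PySem.List.pyGet? devices 0).getD "")))]
  else
    let max_debates := PySem.Int.floordiv ((devices.length : Int) * max_agents_per_device) num_agents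
    let init : PySem.Dict Int (PySem.Dict Int String) :=
      (PySem.List.pyRange 0 max_debates 1).foldl (fun d i => d.insert i PySem.Dict.empty) PySem.Dict.empty
    let fin :=
      (PySem.List.pyRange 0 max_debates 1).foldl (fun s i =>
        (PySem.List.pyRange 0 num_agents 1).foldl (fun s j =>
          if s.2.1 > 0 then
            (s.1, s.2.1 - 1,
              s.2.2.modify i PySem.Dict.empty (fun inner => inner.insert j ((PySem.List.pyGet? devices s.1).getD "")))
          else
            (s.1 + 1, max_agents_per_device - 1,
              s.2.2.modify i PySem.Dict.empty (fun inner => inner.insert j ((PySem.List.pyGet? devices (s.1 + 1)).getD ""))))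
          s)
        ((0 : Int), max_agents_per_device, init)
    fin.2.2.items.map (fun p => (p.1, p.2.items))

-- ===== PORT B =====
def get_agent_device_assignment_alt (num_agents : Int) (max_agents_per_device : Int) (devices : List String) : List (Int × List (Int × String)) :=
  if (devices.length : Int) == 1 && ((PySem.List.pyGet? devices 0).getD "") == "cpu" then
    [(0, (PySem.List.pyRange 0 num_agents 1).map (fun i => (i, (PySem.List.pyGet? devices 0).getD "")))]
  else
    let max_debates := PySem.Int.floordiv ((devices.length : Int) * max_agents_per_device) num_agents
    if max_debates ≤ 0 then []
    else
      let used := max_debates * num_agents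
      -- stage 1: flat roster of the used slots (for-loop with break: state frozen once full)
      let flat := devices.foldl (fun flat d =>
        if used - (flat.length : Int) ≤ 0 then flat
        else flat ++ List.replicate (min max_agents_per_device (used - (flat.length : Int))).toNat d) []
      -- stage 2: chunk the roster into debates of num_agents consecutive slots
      (PySem.List.pyRange 0 max_debates 1).map (fun i =>
        (i, PySem.List.enumerate (PySem.List.slice flat (some (i * num_agents)) (some ((i + 1) * num_agents))) 0))

-- ===== PRECONDITION & SPEC =====
-- Pre_ excludes exactly the inputs on which A raises ZeroDivisionError: num_agents = 0 without the ['cpu'] shortcut (B raises there too).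
def Pre_get_agent_device_assignment (num_agents : Int) (max_agents_per_device : Int) (devices : List String) : Prop :=
  devices = ["cpu"] ∨ num_agents ≠ 0
instance (num_agents : Int) (max_agents_per_device : Int) (devices : List String) : Decidable (Pre_get_agent_device_assignment num_agents max_agents_per_device devices) := by unfold Pre_get_agent_device_assignment; infer_instance

def pvWitness_get_agent_device_assignment : Int × Int × List String := (2, 2, ["d0", "d1"])

def Spec_get_agent_device_assignment (num_agents : Int) (max_agents_per_device : Int) (devices : List String) (out : List (Int × List (Int × String))) : Prop := out = get_agent_device_assignment_alt num_agents max_agents_per_device devices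
instance (num_agents : Int) (max_agents_per_device : Int) (devices : List String) (out : List (Int × List (Int × String))) : Decidable (Spec_get_agent_device_assignment num_agents max_agents_per_device devices out) := by unfold Spec_get_agent_device_assignment; infer_instance

-- ===== CLAIM (what is proved, stated in full; the proofs are below) =====
def Claim_equal_get_agent_device_assignment : Prop := ∀ (num_agents : Int) (max_agents_per_device : Int) (devices : List String), Dom_get_agent_device_assignment num_agents max_agents_per_device devices → Pre_get_agent_device_assignment num_agents max_agents_per_device devices → Spec_get_agent_device_assignment num_agents max_agents_per_device devices (get_agent_device_assignment num_agents max_agents_per_device devices)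

-- ===== LEMMAS AND PROOFS =====

lemma pv_items_modify_middle {ν : Type} (d : PySem.Dict Int ν) (pre post : List (Int × ν)) (i : Int) (v dd0 : ν) (f : ν → ν)
    (h : d.items = pre ++ (i, v) :: post) (hnd : (d.items.map Prod.fst).Nodup) :
    (d.modify i dd0 f).items = pre ++ (i, f v) :: post := by
  have hkeys : d.keys.Nodup := hnd
  have hmem : (i, v) ∈ d.items := by rw [h]; simp
  have hgetD : d.getD i dd0 = v := PySem.Dict.getD_of_mem_items d hmem hkeys dd0
  have hcont : d.contains i = true :=
    (PySem.Dict.contains_iff_mem_keys d i).mpr (by show i ∈ d.items.map Prod.fst; rw [h]; simp)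
  rw [h] at hnd
  simp only [List.map_append, List.map_cons, List.nodup_append] at hnd
  obtain ⟨h1, h2, h3⟩ := hnd
  show (d.insert i (f (d.getD i dd0))).items = _
  rw [hgetD, PySem.Dict.items_insert_of_contains d (f v) hcont, h, List.map_append, List.map_cons]
  congr 1
  · conv_rhs => rw [← List.map_id pre]
    apply List.map_congr_left
    intro p hp
    have : p.1 ≠ i := h3 p.1 (List.mem_map_of_mem hp) i (by simp)
    simp [this]
  · simp only [beq_self_eq_true, List.cons.injEq]
    refine ⟨by simp, ?_⟩
    conv_rhs => rw [← List.map_id post]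
    apply List.map_congr_left
    intro p hp
    have : p.1 ≠ i := fun he => (List.nodup_cons.mp h2).1 (he ▸ List.mem_map_of_mem hp)
    simp [this]

lemma pv_inner_loop (devices : List String) (na mx : Int) (hmx : 0 < mx) (i : Int) :
    ∀ (k : Nat) (j₀ dev cap : Int) (dm : PySem.Dict Int (PySem.Dict Int String))
      (pre post : List (Int × PySem.Dict Int String)) (v : PySem.Dict Int String),
      i * na + j₀ = dev * mx + (mx - cap) → 0 ≤ cap → cap ≤ mx →
      dm.items = pre ++ (i, v) :: post → (dm.items.map Prod.fst).Nodup →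
      ∃ dev₂ cap₂ dm₂,
        ((PySem.List.pyRange j₀ (j₀ + (k : Int)) 1).foldl (fun s j =>
          if s.2.1 > 0 then
            (s.1, s.2.1 - 1,
              s.2.2.modify i PySem.Dict.empty (fun inner => inner.insert j ((PySem.List.pyGet? devices s.1).getD "")))
          else
            (s.1 + 1, mx - 1,
              s.2.2.modify i PySem.Dict.empty (fun inner => inner.insert j ((PySem.List.pyGet? devices (s.1 + 1)).getD ""))))
          (dev, cap, dm)) = (dev₂, cap₂, dm₂) ∧
        i * na + (j₀ + (k : Int)) = dev₂ * mx + (mx - cap₂) ∧ 0 ≤ cap₂ ∧ cap₂ ≤ mx ∧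
        dm₂.items = pre ++ (i, (PySem.List.pyRange j₀ (j₀ + (k : Int)) 1).foldl
            (fun r j => r.insert j ((PySem.List.pyGet? devices (PySem.Int.floordiv (i * na + j) mx)).getD "")) v) :: post := by
  intro k
  induction k with
  | zero =>
    intro j₀ dev cap dm pre post v hinv hc0 hc1 hitems hnd
    refine ⟨dev, cap, dm, ?_, ?_, hc0, hc1, ?_⟩ <;>
      simp [PySem.List.pyRange_one_eq_nil (le_refl j₀), hinv, hitems]
  | succ k ih =>
    intro j₀ dev cap dm pre post v hinv hc0 hc1 hitems hnd
    have hb : j₀ + ((k + 1 : Nat) : Int) = (j₀ + 1) + (k : Int) := by push_cast; ring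
    rw [hb]
    rw [PySem.List.pyRange_one_cons (show j₀ < (j₀ + 1) + (k : Int) by omega), List.foldl_cons, List.foldl_cons]
    by_cases hc : cap > 0
    · have hdev : PySem.Int.floordiv (i * na + j₀) mx = dev :=
        (PySem.Int.floordiv_eq_iff_of_pos hmx).mpr ⟨by nlinarith, by nlinarith⟩
      rw [hdev]
      rw [if_pos (show (dev, cap, dm).2.1 > 0 from hc)]
      have hitems' := pv_items_modify_middle dm pre post i v PySem.Dict.empty
        (fun inner => inner.insert j₀ ((PySem.List.pyGet? devices dev).getD "")) hitems hnd
      have hnd' : (((dm.modify i PySem.Dict.empty (fun inner => inner.insert j₀ ((PySem.List.pyGet? devices dev).getD "")))).items.map Prod.fst).Nodup := by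
        have : ((dm.modify i PySem.Dict.empty (fun inner => inner.insert j₀ ((PySem.List.pyGet? devices dev).getD ""))).items.map Prod.fst)
            = dm.items.map Prod.fst := by rw [hitems', hitems]; simp
        rw [this]; exact hnd
      exact ih (j₀ + 1) dev (cap - 1) _ pre post _ (by omega) (by omega) (by omega) hitems' hnd'
    · have hcap : cap = 0 := by omega
      have hdev : PySem.Int.floordiv (i * na + j₀) mx = dev + 1 :=
        (PySem.Int.floordiv_eq_iff_of_pos hmx).mpr ⟨by nlinarith, by nlinarith⟩
      rw [hdev]
      rw [if_neg (show ¬((dev, cap, dm).2.1 > 0) from hc)]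
      have hitems' := pv_items_modify_middle dm pre post i v PySem.Dict.empty
        (fun inner => inner.insert j₀ ((PySem.List.pyGet? devices (dev + 1)).getD "")) hitems hnd
      have hnd' : (((dm.modify i PySem.Dict.empty (fun inner => inner.insert j₀ ((PySem.List.pyGet? devices (dev + 1)).getD "")))).items.map Prod.fst).Nodup := by
        have : ((dm.modify i PySem.Dict.empty (fun inner => inner.insert j₀ ((PySem.List.pyGet? devices (dev + 1)).getD ""))).items.map Prod.fst)
            = dm.items.map Prod.fst := by rw [hitems', hitems]; simp
        rw [this]; exact hnd
      exact ih (j₀ + 1) (dev + 1) (mx - 1) _ pre post _ (by nlinarith) (by omega) (by omega) hitems' hnd'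

lemma pv_items_empty {ν : Type} : (PySem.Dict.empty : PySem.Dict Int ν).items = [] := rfl

lemma pv_foldl_id {α β : Type} (l : List β) (s : α) : l.foldl (fun s _ => s) s = s := by
  induction l generalizing s with
  | nil => rfl
  | cons x xs ih => simpa using ih s

lemma pv_items_foldl_fresh {ν : Type} (f : Int → ν) :
    ∀ (l : List Int) (d : PySem.Dict Int ν), (∀ a ∈ l, d.contains a = false) → l.Nodup →
      (l.foldl (fun d a => d.insert a (f a)) d).items = d.items ++ l.map (fun a => (a, f a)) := by
  intro l
  induction l with
  | nil => simp
  | cons x xs ih =>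
    intro d hf hnd
    simp only [List.foldl_cons, List.map_cons]
    rw [ih (d.insert x (f x)) ?fresh (List.nodup_cons.mp hnd).2]
    · rw [PySem.Dict.items_insert_of_not_contains d (f x) (hf x (by simp))]
      simp
    case fresh =>
      intro a ha
      rw [PySem.Dict.contains_insert]
      have hne : (a == x) = false := by
        have : a ≠ x := fun he => (List.nodup_cons.mp hnd).1 (he ▸ ha)
        simpa using this
      simp [hne, hf a (List.mem_cons_of_mem _ ha)]

lemma pv_outer_loop (devices : List String) (na mx : Int) (hmx : 0 < mx) (hna : 0 < na) :
    ∀ (k : Nat) (i₀ dev cap : Int) (dm : PySem.Dict Int (PySem.Dict Int String))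
      (pre : List (Int × PySem.Dict Int String)),
      i₀ * na = dev * mx + (mx - cap) → 0 ≤ cap → cap ≤ mx →
      dm.items = pre ++ (PySem.List.pyRange i₀ (i₀ + (k : Int)) 1).map (fun i => (i, PySem.Dict.empty)) →
      (dm.items.map Prod.fst).Nodup →
      (((PySem.List.pyRange i₀ (i₀ + (k : Int)) 1).foldl (fun s i =>
          (PySem.List.pyRange 0 na 1).foldl (fun s j =>
            if s.2.1 > 0 then
              (s.1, s.2.1 - 1,
                s.2.2.modify i PySem.Dict.empty (fun inner => inner.insert j ((PySem.List.pyGet? devices s.1).getD "")))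
            else
              (s.1 + 1, mx - 1,
                s.2.2.modify i PySem.Dict.empty (fun inner => inner.insert j ((PySem.List.pyGet? devices (s.1 + 1)).getD ""))))
            s)
          (dev, cap, dm)).2.2).items
        = pre ++ (PySem.List.pyRange i₀ (i₀ + (k : Int)) 1).map (fun i =>
            (i, (PySem.List.pyRange 0 na 1).foldl
              (fun r j => r.insert j ((PySem.List.pyGet? devices (PySem.Int.floordiv (i * na + j) mx)).getD "")) PySem.Dict.empty)) := by
  intro k
  induction k with
  | zero =>
    intro i₀ dev cap dm pre hinv hc0 hc1 hitems hnd
    simpa [PySem.List.pyRange_one_eq_nil (le_refl i₀)] using hitems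
  | succ k ih =>
    intro i₀ dev cap dm pre hinv hc0 hc1 hitems hnd
    have hb : i₀ + ((k + 1 : Nat) : Int) = (i₀ + 1) + (k : Int) := by push_cast; ring
    rw [hb] at hitems ⊢
    rw [PySem.List.pyRange_one_cons (show i₀ < (i₀ + 1) + (k : Int) by omega)] at hitems ⊢
    rw [List.foldl_cons, List.map_cons]
    rw [List.map_cons] at hitems
    obtain ⟨dev₂, cap₂, dm₂, hfold, hinv₂, hc0₂, hc1₂, hitems₂⟩ :=
      pv_inner_loop devices na mx hmx i₀ na.toNat 0 dev cap dm pre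
        ((PySem.List.pyRange (i₀ + 1) (i₀ + 1 + (k : Int)) 1).map (fun i => (i, PySem.Dict.empty)))
        PySem.Dict.empty (by rw [add_zero]; exact hinv) hc0 hc1 hitems hnd
    rw [show ((0 : Int) + (na.toNat : Int)) = na from by omega] at hfold hinv₂ hitems₂
    rw [hfold]
    have hnd₂ : (dm₂.items.map Prod.fst).Nodup := by
      have : dm₂.items.map Prod.fst = dm.items.map Prod.fst := by
        rw [hitems₂, hitems]; simp
      rw [this]; exact hnd
    rw [ih (i₀ + 1) dev₂ cap₂ dm₂ (pre ++ [(i₀, (PySem.List.pyRange 0 na 1).foldl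
        (fun r j => r.insert j ((PySem.List.pyGet? devices (PySem.Int.floordiv (i₀ * na + j) mx)).getD "")) PySem.Dict.empty)])
      (by linear_combination hinv₂) hc0₂ hc1₂ (by rw [hitems₂]; simp) hnd₂]
    simp

lemma pv_flat_get (M : Nat) (hM : 0 < M) :
    ∀ (devices : List String) (n : Nat),
      (devices.flatMap (fun d => List.replicate M d))[n]? = devices[n / M]? := by
  intro devices
  induction devices with
  | nil => intro n; simp
  | cons d t ih =>
    intro n
    by_cases hn : n < M
    · rw [List.flatMap_cons, List.getElem?_append_left (by simpa using hn)]
      have : n / M = 0 := Nat.div_eq_of_lt hn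
      simp [this, List.getElem?_replicate, hn]
    · push_neg at hn
      rw [List.flatMap_cons, List.getElem?_append_right (by simpa using hn)]
      rw [List.length_replicate, ih (n - M)]
      have h1 : (n - M) / M = n / M - 1 := by
        rcases Nat.exists_eq_add_of_le hn with ⟨k, rfl⟩
        rw [Nat.add_sub_cancel_left, Nat.add_comm M k, Nat.add_div_right _ hM, Nat.add_sub_cancel]
      have h2 : 1 ≤ n / M := Nat.one_le_div_iff hM |>.mpr hn
      rw [h1]
      rcases Nat.exists_eq_add_of_le h2 with ⟨q, hq⟩
      rw [hq, Nat.add_sub_cancel_left, Nat.add_comm]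
      simp

lemma pv_slice_nil {α : Type} (a? b? : Option Int) : PySem.List.slice ([] : List α) a? b? = [] := by
  cases a? <;> cases b? <;> simp [PySem.List.slice]

lemma pv_cpu_cond (devices : List String) :
    (((devices.length : Int) == 1) && ((PySem.List.pyGet? devices 0).getD "") == "cpu") = (devices == ["cpu"]) := by
  match devices with
  | [] => simp [PySem.List.pyGet?]
  | [d] => simp [PySem.List.pyGet?, PySem.List.pyIdx?]
  | a :: b :: t => simp [PySem.List.pyGet?]; omega

lemma pv_len_flat (devices : List String) (M : Nat) :
    (devices.flatMap (fun d => List.replicate M d)).length = devices.length * M := by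
  induction devices with
  | nil => simp
  | cons d t ih => simp [ih]; ring

lemma pv_roster (mx : Int) :
    ∀ (devices : List String) (acc : List String) (u : Int),
      devices.foldl (fun flat d =>
        if u - (flat.length : Int) ≤ 0 then flat
        else flat ++ List.replicate (min mx (u - (flat.length : Int))).toNat d) acc
      = acc ++ (devices.flatMap (fun d => List.replicate mx.toNat d)).take ((u - (acc.length : Int)).toNat) := by
  intro devices
  induction devices with
  | nil => intro acc u; simp
  | cons d t ih =>
    intro acc u
    simp only [List.foldl_cons, List.flatMap_cons]
    by_cases hg : u - ((acc.length : Nat) : Int) ≤ 0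
    · rw [if_pos hg, ih]
      have h0 : (u - ((acc.length : Nat) : Int)).toNat = 0 := by omega
      rw [h0]
      simp [h0]
    · rw [if_neg hg, ih]
      rw [List.append_assoc]
      congr 1
      rw [List.take_append, List.take_replicate]
      have hlen : ((acc ++ List.replicate (min mx (u - ((acc.length : Nat) : Int))).toNat d).length : Int)
          = (acc.length : Int) + ((min mx (u - ((acc.length : Nat) : Int))).toNat : Int) := by
        simp
      rw [hlen]
      have hm : (min mx (u - ((acc.length : Nat) : Int))).toNat
          = min (u - ((acc.length : Nat) : Int)).toNat mx.toNat := by omega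
      have ht : (u - ((acc.length : Int) + ((min mx (u - ((acc.length : Nat) : Int))).toNat : Int))).toNat
          = (u - ((acc.length : Nat) : Int)).toNat - (List.replicate mx.toNat d).length := by
        simp only [List.length_replicate]
        omega
      rw [ht, hm]

lemma pv_row (devices : List String) (na mx md i : Int) (hna : 0 < na) (hmx : 0 < mx)
    (hmdle : md * na ≤ (devices.length : Int) * mx) (hi0 : 0 ≤ i) (hi : i + 1 ≤ md) :
    PySem.List.enumerate
      (PySem.List.slice
        ((devices.flatMap (fun d => List.replicate mx.toNat d)).take ((md * na).toNat))
        (some (i * na)) (some ((i + 1) * na))) 0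
    = (PySem.List.pyRange 0 na 1).map
        (fun j => (j, (PySem.List.pyGet? devices (PySem.Int.floordiv (i * na + j) mx)).getD "")) := by
  set flat0 := devices.flatMap (fun d => List.replicate mx.toNat d) with hflat0
  have hM : 0 < mx.toNat := by omega
  have hlen0 : flat0.length = devices.length * mx.toNat := pv_len_flat devices mx.toNat
  have hmdpos : (0 : Int) < md * na := by nlinarith
  have hia : (0 : Int) ≤ i * na := by positivity
  have hib : (0 : Int) ≤ (i + 1) * na := by positivity
  rw [PySem.List.slice_toNat _ hia hib]
  set T := (md * na).toNat with hT
  set a := (i * na).toNat with ha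
  set N := na.toNat with hN
  have hb : ((i + 1) * na).toNat = a + N := by
    have : (i + 1) * na = i * na + na := by ring
    rw [this]; omega
  have haNT : a + N ≤ T := by
    have h1 : (i + 1) * na ≤ md * na := by nlinarith
    omega
  have hcast : ((devices.length * mx.toNat : Nat) : Int) = (devices.length : Int) * mx := by
    push_cast [Int.toNat_of_nonneg (le_of_lt hmx)]
    ring
  have hTlen : T ≤ flat0.length := by
    rw [hlen0]
    omega
  rw [hb, Nat.add_sub_cancel_left]
  rw [List.drop_take, List.take_take]
  have hmin : min N (T - a) = N := by omega
  rw [hmin]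
  set chunk := (flat0.drop a).take N with hchunk
  have hclen : chunk.length = N := by
    rw [hchunk]; simp; omega
  have henum := PySem.List.enumerate_eq_map_pyRange (xs := chunk) ""
  have hlen_eq : PySem.List.len chunk = (N : Int) := by
    simp [pysem, hclen]
  rw [henum, hlen_eq]
  have hNna : (N : Int) = na := by omega
  rw [hNna]
  apply List.map_congr_left
  intro j hj
  have hj' : 0 ≤ j ∧ j < na := by
    have := PySem.List.mem_pyRange_one.mp hj
    omega
  set k := j.toNat with hk
  have hjk : j = (k : Int) := by omega
  have hkN : k < N := by omega
  have hkchunk : k < chunk.length := by rw [hclen]; exact hkN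
  congr 1
  -- left: chunk[k]; right: devices[(a+k)/M]
  have hakL : a + k < flat0.length := by omega
  have hdivL : (a + k) / mx.toNat < devices.length := by
    have h : a + k < mx.toNat * devices.length := by rw [hlen0, Nat.mul_comm] at hakL; exact hakL
    exact Nat.div_lt_of_lt_mul h
  have hchunkget : chunk[k]? = devices[(a + k) / mx.toNat]? := by
    rw [hchunk, List.getElem?_take_of_lt hkN, List.getElem?_drop]
    exact pv_flat_get mx.toNat hM devices (a + k)
  have hL : PySem.List.pyGetD chunk j "" = devices[(a + k) / mx.toNat]'hdivL := by
    have hjb : j < ((chunk.length : Nat) : Int) := by rw [hclen]; omega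
    rw [PySem.List.pyGetD_eq_getElem chunk "" hj'.1 hjb]
    have h1 : chunk[k]'hkchunk = devices[(a + k) / mx.toNat]'hdivL := by
      have h2 := hchunkget
      rw [List.getElem?_eq_getElem hkchunk, List.getElem?_eq_getElem hdivL] at h2
      exact Option.some.inj h2
    exact h1
  rw [hL]
  have hidx : PySem.Int.floordiv (i * na + j) mx = (((a + k) / mx.toNat : Nat) : Int) := by
    have h1 : i * na + j = (((a + k : Nat)) : Int) := by
      push_cast; omega
    have h2 : mx = ((mx.toNat : Nat) : Int) := by omega
    rw [h1, h2, PySem.Int.floordiv_natCast]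
    simp
  rw [hidx]
  rw [PySem.List.pyGet?_natCast devices ((a + k) / mx.toNat), List.getElem?_eq_getElem hdivL]
  rfl

-- ===== VERDICT (by name: the statement is the Claim_ definition above) =====
theorem get_agent_device_assignment_spec : Claim_equal_get_agent_device_assignment := by
  intro num_agents max_agents_per_device devices _ hpre
  unfold Spec_get_agent_device_assignment Pre_get_agent_device_assignment at *
  rw [get_agent_device_assignment, get_agent_device_assignment_alt, pv_cpu_cond devices]
  by_cases hcpu : devices = ["cpu"]
  · simp [hcpu]
  · have hcpu' : (devices == ["cpu"]) = false := by simpa using hcpu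
    rw [hcpu']
    simp only [Bool.false_eq_true, if_false]
    have hna : num_agents ≠ 0 := hpre.resolve_left hcpu
    set md := PySem.Int.floordiv ((devices.length : Int) * max_agents_per_device) num_agents with hmd_def
    have hfm := PySem.Int.floordiv_mul_add_mod ((devices.length : Int) * max_agents_per_device) num_agents
    have hL : (0 : Int) ≤ (devices.length : Int) := Int.natCast_nonneg _
    by_cases hmd : md ≤ 0
    · rw [PySem.List.pyRange_one_eq_nil hmd, if_pos hmd]
      simp [pv_items_empty]
    · rw [not_le] at hmd
      rcases lt_or_gt_of_ne hna with hneg | hpos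
      · -- num_agents < 0: inner loops and the flat roster are both empty
        rw [PySem.List.pyRange_one_eq_nil (le_of_lt hneg)]
        simp only [List.foldl_nil]
        rw [pv_foldl_id]
        have hinit : ((PySem.List.pyRange 0 md 1).foldl (fun d i => d.insert i PySem.Dict.empty)
            (PySem.Dict.empty : PySem.Dict Int (PySem.Dict Int String))).items
            = PySem.Dict.empty.items ++ (PySem.List.pyRange 0 md 1).map (fun i => (i, PySem.Dict.empty)) :=
          pv_items_foldl_fresh (fun _ => PySem.Dict.empty) _ _ (fun a _ => PySem.Dict.contains_empty a)
            (PySem.List.nodup_pyRange_one 0 md)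
        rw [hinit, if_neg (not_le.mpr hmd)]
        have hrs := pv_roster max_agents_per_device devices [] (md * num_agents)
        simp only [List.length_nil, Int.natCast_zero, sub_zero, List.nil_append] at hrs
        rw [hrs]
        have h1 : md * num_agents < 0 := mul_neg_of_pos_of_neg hmd hneg
        have h0 : (md * num_agents).toNat = 0 := by omega
        rw [h0]
        simp [pv_items_empty, pv_slice_nil, List.map_map, Function.comp_def, PySem.List.enumerate_nil]
      · -- num_agents > 0, md > 0: main case
        have hmx : 0 < max_agents_per_device := by
          have h1 : (1 : Int) ≤ md := hmd
          nlinarith [PySem.Int.mod_nonneg ((devices.length : Int) * max_agents_per_device) hpos]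
        have hmdle : md * num_agents ≤ (devices.length : Int) * max_agents_per_device := by
          nlinarith [PySem.Int.mod_nonneg ((devices.length : Int) * max_agents_per_device) hpos]
        have hinit : ((PySem.List.pyRange 0 md 1).foldl (fun d i => d.insert i PySem.Dict.empty)
            (PySem.Dict.empty : PySem.Dict Int (PySem.Dict Int String))).items
            = PySem.Dict.empty.items ++ (PySem.List.pyRange 0 md 1).map (fun i => (i, PySem.Dict.empty)) :=
          pv_items_foldl_fresh (fun _ => PySem.Dict.empty) _ _ (fun a _ => PySem.Dict.contains_empty a)
            (PySem.List.nodup_pyRange_one 0 md)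
        have houter := pv_outer_loop devices num_agents max_agents_per_device hmx hpos md.toNat 0 0
          max_agents_per_device
          ((PySem.List.pyRange 0 md 1).foldl (fun d i => d.insert i PySem.Dict.empty) PySem.Dict.empty)
          [] (by ring) (le_of_lt hmx) (le_refl _)
          (by rw [show ((0 : Int) + (md.toNat : Int)) = md from by omega]; simpa [pv_items_empty] using hinit)
          (by rw [hinit]; simp [pv_items_empty, Function.comp_def, PySem.List.nodup_pyRange_one])
        rw [show ((0 : Int) + (md.toNat : Int)) = md from by omega] at houter
        have hrs := pv_roster max_agents_per_device devices [] (md * num_agents)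
        simp only [List.length_nil, Int.natCast_zero, sub_zero, List.nil_append] at hrs
        rw [if_neg (not_le.mpr hmd), hrs, houter]
        simp only [List.nil_append, List.map_map]
        apply List.map_congr_left
        intro i hi
        have hi' : 0 ≤ i ∧ i < md := by
          have := PySem.List.mem_pyRange_one.mp hi
          omega
        simp only [Function.comp_apply]
        congr 1
        have hrow := pv_items_foldl_fresh
          (fun j => ((PySem.List.pyGet? devices (PySem.Int.floordiv (i * num_agents + j) max_agents_per_device)).getD ""))
          (PySem.List.pyRange 0 num_agents 1) PySem.Dict.empty
          (fun a _ => PySem.Dict.contains_empty a) (PySem.List.nodup_pyRange_one 0 num_agents)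
        rw [hrow]
        rw [pv_row devices num_agents max_agents_per_device md i hpos hmx hmdle hi'.1 (by omega)]
        simp [pv_items_empty]
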